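-- pv_equiv track=rewrite | github.com/lardexxx/scanner_hybrid | scanners/csrf_checks.py | detect_samesite_issue
-- ===== SOURCE A (Python) =====
-- from typing import Dict, List
--
-- def detect_samesite_issue(headers: Dict[str, str]) -> bool:
--     raw = headers.get("Set-Cookie", "")
--     if not raw:
--         return False
--
--     for cookie in split_set_cookie_header(raw):
--         lowered = cookie.lower()
--         if "samesite" not in lowered:
--             return True
--         if "samesite=none" in lowered and "secure" not in lowered:
--             return True
--     return False
--
-- def split_set_cookie_header(raw: str) -> List[str]:
--     if not raw:
--         return []
--
--     # Keep commas inside Expires=... intact while splitting cookies.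
--     parts: List[str] = []
--     chunk: List[str] = []
--     i = 0
--     in_expires = False
--     lowered = raw.lower()
--
--     while i < len(raw):
--         ch = raw[i]
--
--         if lowered[i : i + 8] == "expires=":
--             in_expires = True
--
--         if ch == "," and not in_expires:
--             cookie = "".join(chunk).strip()
--             if cookie:
--                 parts.append(cookie)
--             chunk = []
--             i += 1
--             continue
--
--         if ch == ";" and in_expires:
--             in_expires = False
--
--         chunk.append(ch)
--         i += 1
--
--     tail = "".join(chunk).strip()
--     if tail:
--         parts.append(tail)
--
--     return parts
-- ===== SOURCE B (Python) =====
-- from typing import Dict, List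
--
--
-- def _end_state(low: str, st: bool) -> bool:
--     # state after scanning one comma-free (lowered) segment:
--     # "expires=" turns it on, a later ";" turns it off
--     for j in range(len(low)):
--         if low[j:j + 8] == "expires=":
--             st = True
--         elif low[j] == ";":
--             st = False
--     return st
--
--
-- def split_set_cookie_header(raw: str) -> List[str]:
--     # naive comma split, then merge segments that belong to an Expires=... date
--     parts: List[str] = []
--     cur: List[str] = []
--     in_exp = False
--     for seg in raw.split(','):
--         if in_exp:
--             cur.append(seg)
--         else:
--             if cur:
--                 cookie = ",".join(cur).strip()
--                 if cookie:
--                     parts.append(cookie)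
--             cur = [seg]
--         in_exp = _end_state(seg.lower(), in_exp)
--     if cur:
--         cookie = ",".join(cur).strip()
--         if cookie:
--             parts.append(cookie)
--     return parts
--
--
-- def _weak(cookie: str) -> bool:
--     low = cookie.lower()
--     return "samesite" not in low or ("samesite=none" in low and "secure" not in low)
--
--
-- def detect_samesite_issue(headers: Dict[str, str]) -> bool:
--     raw = headers.get("Set-Cookie", "")
--     return any(_weak(c) for c in split_set_cookie_header(raw))
-- ===== Notes on version B (the rewrite author's own statement) =====
-- stated objective: alternative
-- what changed: split_set_cookie_header is rewritten as a two-pass process: a naive split on ',' followed by a left-to-right merge of segments that maintains an in-Expires flag per segment (computed by a small per-segment scan), instead of A's single character-by-character state machine; the detector becomes any() over a weakness predicate instead of an early-return loop.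
import Mathlib
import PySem

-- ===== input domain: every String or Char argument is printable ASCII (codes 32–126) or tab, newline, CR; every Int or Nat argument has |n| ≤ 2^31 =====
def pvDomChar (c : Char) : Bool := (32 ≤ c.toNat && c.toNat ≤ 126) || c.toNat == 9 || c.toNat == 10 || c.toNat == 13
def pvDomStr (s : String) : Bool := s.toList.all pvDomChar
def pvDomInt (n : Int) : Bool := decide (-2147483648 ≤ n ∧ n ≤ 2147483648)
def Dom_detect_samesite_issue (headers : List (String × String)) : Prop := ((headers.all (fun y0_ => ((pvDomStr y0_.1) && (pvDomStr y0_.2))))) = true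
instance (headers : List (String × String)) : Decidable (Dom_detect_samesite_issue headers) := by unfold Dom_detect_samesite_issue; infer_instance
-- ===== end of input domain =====

-- B rewrites split_set_cookie_header as naive comma-split + segment merge (same cost); equivalence of both detectors is proved below.

-- "expires=" as a character list
def pvExp : List Char := ['e', 'x', 'p', 'i', 'r', 'e', 's', '=']

-- close the current cookie: strip it, drop it if empty (shared shape of A's two closing sites)
def pvClose (parts : List (List Char)) (chunk : List Char) : List (List Char) :=
  let cookie := PySem.Chars.strip chunk
  if cookie = [] then parts else parts ++ [cookie]

-- ===== PORT A =====
-- A's while-loop over raw.  A pre-computes lowered = raw.lower() and slices lowered[i:i+8];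
-- here that slice is read as (lower of the remainder).take 8 — the same value, because
-- PySem.Chars.lower maps characters independently (it is List.map lowerChar).
def pvGoA : List Char → List (List Char) → List Char → Bool → List (List Char)
  | [], parts, chunk, _ => pvClose parts chunk
  | c :: cs, parts, chunk, inE =>
      let inE1 := if (PySem.Chars.lower (c :: cs)).take 8 = pvExp then true else inE
      if c = ',' ∧ inE1 = false then
        pvGoA cs (pvClose parts chunk) [] inE1
      else
        let inE2 := if c = ';' ∧ inE1 = true then false else inE1
        pvGoA cs parts (chunk ++ [c]) inE2

def pvSplitA (raw : List Char) : List (List Char) :=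
  if raw = [] then [] else pvGoA raw [] [] false

def pvLoopA : List (List Char) → Bool
  | [] => false
  | cookie :: rest =>
      let low := PySem.Chars.lower cookie
      if PySem.Chars.isIn "samesite".toList low = false then true
      else if PySem.Chars.isIn "samesite=none".toList low = true ∧
              PySem.Chars.isIn "secure".toList low = false then true
      else pvLoopA rest

def detect_samesite_issue (headers : List (String × String)) : Bool :=
  let raw := (PySem.Dict.getD (PySem.Dict.mk headers) "Set-Cookie" "").toList
  if raw = [] then false else pvLoopA (pvSplitA raw)

-- ===== PORT B =====
-- B's _end_state: state after scanning one (lowered) segment; low[j:j+8] is again the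
-- head of the remainder (lower is per-character).
def pvSegStep : List Char → Bool → Bool
  | [], st => st
  | c :: cs, st =>
      pvSegStep cs (if (c :: cs).take 8 = pvExp then true else if c = ';' then false else st)

def pvCloseB (parts : List (List Char)) (cur : List (List Char)) : List (List Char) :=
  let cookie := PySem.Chars.strip (PySem.Chars.join [','] cur)
  if cookie = [] then parts else parts ++ [cookie]

def pvGoB : List (List Char) → List (List Char) → List (List Char) → Bool → List (List Char)
  | [], parts, cur, _ => if cur = [] then parts else pvCloseB parts cur
  | s :: ss, parts, cur, inE =>
      if inE then pvGoB ss parts (cur ++ [s]) (pvSegStep (PySem.Chars.lower s) inE)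
      else pvGoB ss (if cur = [] then parts else pvCloseB parts cur) [s]
             (pvSegStep (PySem.Chars.lower s) inE)

def pvSplitB (raw : List Char) : List (List Char) :=
  pvGoB (PySem.Chars.splitOn raw [',']) [] [] false

def pvWeakB (cookie : List Char) : Bool :=
  let low := PySem.Chars.lower cookie
  !(PySem.Chars.isIn "samesite".toList low) ||
    (PySem.Chars.isIn "samesite=none".toList low && !(PySem.Chars.isIn "secure".toList low))

def detect_samesite_issue_alt (headers : List (String × String)) : Bool :=
  let raw := (PySem.Dict.getD (PySem.Dict.mk headers) "Set-Cookie" "").toList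
  (pvSplitB raw).any pvWeakB

-- ===== PRECONDITION & SPEC =====
def Spec_detect_samesite_issue (headers : List (String × String)) (out : Bool) : Prop := out = detect_samesite_issue_alt headers
instance (headers : List (String × String)) (out : Bool) : Decidable (Spec_detect_samesite_issue headers out) := by unfold Spec_detect_samesite_issue; infer_instance

-- ===== CLAIM (what is proved, stated in full; the proofs are below) =====
def Claim_equal_detect_samesite_issue : Prop := ∀ (headers : List (String × String)), Dom_detect_samesite_issue headers → Spec_detect_samesite_issue headers (detect_samesite_issue headers)

-- ===== LEMMAS AND PROOFS =====

theorem pv_strip_nil : PySem.Chars.rstrip (PySem.Chars.lstrip []) = [] := by decide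

-- the clean recursive comma-split (proof-side model of raw.split(','))
def pvSplitC : List Char → List (List Char)
  | [] => [[]]
  | c :: r =>
      match pvSplitC r with
      | [] => [[c]]
      | h :: t => if c = ',' then [] :: h :: t else (c :: h) :: t

-- the merged state machine A reduces to on the segment list
def pvGoM : List (List Char) → List (List Char) → List Char → Bool → List (List Char)
  | [], parts, chunk, _ => pvClose parts chunk
  | [s], parts, chunk, _ => pvClose parts (chunk ++ s)
  | s :: s₂ :: ss, parts, chunk, b =>
      let b' := pvSegStep (PySem.Chars.lower s) b
      if b' then pvGoM (s₂ :: ss) parts (chunk ++ s ++ [',']) b'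
      else pvGoM (s₂ :: ss) (pvClose parts (chunk ++ s)) [] false

theorem pv_lowerChar_low (c d : Char) (hd : d.toNat < 65) :
    PySem.Chars.lowerChar c = d ↔ c = d := by
  unfold PySem.Chars.lowerChar
  split_ifs with h
  · simp [PySem.Chars.isupper, Char.le_def] at h
    have h1 : 65 ≤ c.toNat := by exact_mod_cast h.1
    have h2 : c.toNat ≤ 90 := by exact_mod_cast h.2
    have hv : (Char.ofNat (c.toNat + 32)).toNat = c.toNat + 32 := by
      rw [Char.toNat_ofNat, if_pos]
      exact Or.inl (by omega)
    constructor
    · intro he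
      have := congrArg Char.toNat he
      rw [hv] at this
      omega
    · intro he
      exfalso
      subst he
      omega
  · exact Iff.rfl

-- window truncation: across a following comma the "expires=" window cannot match
theorem pv_window (s r : List Char)
    (hr : r = [] ∨ ∃ r', r = ',' :: r') :
    ((s ++ r).take 8 = pvExp) ↔ (s.take 8 = pvExp) := by
  rcases hr with rfl | ⟨r', rfl⟩
  · simp
  · by_cases hl : 8 ≤ s.length
    · rw [List.take_append_of_le_length hl]
    · replace hl := Nat.lt_of_not_le hl
      constructor
      · intro hEq
        exfalso
        have hidx : s.length < ((s ++ ',' :: r').take 8).length := by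
          simp
          omega
        have hg : ((s ++ ',' :: r').take 8)[s.length]'hidx = ',' := by
          rw [List.getElem_take]
          rw [List.getElem_append_right (le_refl s.length)]
          simp
        have hmem := List.getElem_mem hidx
        rw [hg, hEq] at hmem
        simp [pvExp] at hmem
      · intro hEq
        exfalso
        have : (s.take 8).length = s.length := by
          simp
          omega
        have h8 : pvExp.length = 8 := by decide
        rw [hEq, h8] at this
        omega

-- consuming one comma-free segment
theorem pv_seg (s : List Char) (hs : ',' ∉ s) (rest : List Char)
    (hr : rest = [] ∨ ∃ r', rest = ',' :: r') (parts : List (List Char))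
    (chunk : List Char) (b : Bool) :
    pvGoA (s ++ rest) parts chunk b
      = pvGoA rest parts (chunk ++ s) (pvSegStep (PySem.Chars.lower s) b) := by
  induction s generalizing parts chunk b with
  | nil => simp [PySem.Chars.lower, pvSegStep]
  | cons c cs ih =>
    have hc : c ≠ ',' := by
      intro h
      exact hs (by rw [h]; exact List.mem_cons_self)
    have hcs : ',' ∉ cs := fun h => hs (List.mem_cons_of_mem _ h)
    have hlcc : PySem.Chars.lower (c :: cs) = PySem.Chars.lowerChar c :: PySem.Chars.lower cs := by
      simp [PySem.Chars.lower]
    have hw : ((PySem.Chars.lower (c :: (cs ++ rest))).take 8 = pvExp)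
        ↔ ((PySem.Chars.lower (c :: cs)).take 8 = pvExp) := by
      have h1 : PySem.Chars.lower (c :: (cs ++ rest))
          = PySem.Chars.lower (c :: cs) ++ PySem.Chars.lower rest := by
        simp [PySem.Chars.lower]
      rw [h1]
      apply pv_window
      rcases hr with rfl | ⟨r', rfl⟩
      · left; simp [PySem.Chars.lower]
      · right
        refine ⟨PySem.Chars.lower r', ?_⟩
        have h2 : PySem.Chars.lowerChar ',' = ',' := by decide
        simp [PySem.Chars.lower, h2]
    rw [List.cons_append]
    by_cases hW : (PySem.Chars.lower (c :: cs)).take 8 = pvExp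
    · have hW' := hW
      rw [hlcc, show (8 : ℕ) = 7 + 1 from rfl, List.take_succ_cons] at hW'
      have he : PySem.Chars.lowerChar c = 'e' := ((List.cons.injEq _ _ _ _).mp hW').1
      have hsemi : c ≠ ';' := by
        intro h
        rw [h] at he
        exact absurd he (by decide)
      have harg : pvSegStep (PySem.Chars.lower (c :: cs)) b = pvSegStep (PySem.Chars.lower cs) true := by
        rw [hlcc]
        simp only [pvSegStep]
        rw [show List.take 8 (PySem.Chars.lowerChar c :: PySem.Chars.lower cs)
              = PySem.Chars.lowerChar c :: List.take 7 (PySem.Chars.lower cs) from rfl]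
        simp [hW']
      rw [harg]
      simp only [pvGoA, hw, if_pos hW, hc, false_and, if_false, hsemi, and_true]
      rw [ih hcs]
      simp
    · have hW' := hW
      rw [hlcc, show (8 : ℕ) = 7 + 1 from rfl, List.take_succ_cons] at hW'
      have harg : pvSegStep (PySem.Chars.lower (c :: cs)) b
          = pvSegStep (PySem.Chars.lower cs)
              (if PySem.Chars.lowerChar c = ';' then false else b) := by
        rw [hlcc]
        simp only [pvSegStep]
        rw [show List.take 8 (PySem.Chars.lowerChar c :: PySem.Chars.lower cs)
              = PySem.Chars.lowerChar c :: List.take 7 (PySem.Chars.lower cs) from rfl]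
        rw [if_neg hW']
      rw [harg]
      simp only [pvGoA, hw, if_neg hW, hc, false_and, if_false]
      rw [ih hcs]
      have hstate : (if c = ';' ∧ b = true then false else b)
          = (if PySem.Chars.lowerChar c = ';' then false else b) := by
        by_cases hsemi : c = ';'
        · subst hsemi
          have hls : PySem.Chars.lowerChar ';' = ';' := by decide
          cases b <;> simp [hls]
        · have hls : PySem.Chars.lowerChar c ≠ ';' := by
            intro h
            exact hsemi ((pv_lowerChar_low c ';' (by decide)).mp h)
          simp [hsemi, hls]
      rw [hstate]
      simp

theorem pv_join_singleton' (s : List Char) : PySem.Chars.join [','] [s] = s := by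
  simp [PySem.Chars.join, List.intercalate]

theorem pv_join_append (cur : List (List Char)) (s : List Char) (h : cur ≠ []) :
    PySem.Chars.join [','] (cur ++ [s]) = PySem.Chars.join [','] cur ++ ',' :: s := by
  induction cur with
  | nil => exact absurd rfl h
  | cons x cur' ih =>
    cases cur' with
    | nil =>
      rw [List.cons_append, List.nil_append, PySem.Chars.join_cons_cons,
          pv_join_singleton', pv_join_singleton']
      simp
    | cons y cur'' =>
      rw [show (x :: y :: cur'') ++ [s] = x :: ((y :: cur'') ++ [s]) from rfl]
      rw [show (y :: cur'') ++ [s] = y :: (cur'' ++ [s]) from rfl]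
      rw [PySem.Chars.join_cons_cons]
      rw [show (y : List Char) :: (cur'' ++ [s]) = (y :: cur'') ++ [s] from rfl]
      rw [ih (by simp)]
      rw [PySem.Chars.join_cons_cons]
      simp

theorem pv_AM (segs : List (List Char)) (hs : ∀ s ∈ segs, ',' ∉ s) :
    ∀ parts chunk b,
      pvGoA (PySem.Chars.join [','] segs) parts chunk b = pvGoM segs parts chunk b := by
  induction segs with
  | nil =>
    intro parts chunk b
    simp [PySem.Chars.join, List.intercalate, pvGoA, pvGoM]
  | cons s ss ih =>
    intro parts chunk b
    have hsfree : ',' ∉ s := hs s List.mem_cons_self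
    have hss : ∀ t ∈ ss, ',' ∉ t := fun t ht => hs t (List.mem_cons_of_mem _ ht)
    cases ss with
    | nil =>
      rw [pv_join_singleton']
      have h0 := pv_seg s hsfree [] (Or.inl rfl) parts chunk b
      rw [List.append_nil] at h0
      rw [h0]
      simp [pvGoA, pvGoM]
    | cons s₂ ss' =>
      rw [PySem.Chars.join_cons_cons]
      rw [show s ++ [','] ++ PySem.Chars.join [','] (s₂ :: ss')
            = s ++ (',' :: PySem.Chars.join [','] (s₂ :: ss')) by simp]
      rw [pv_seg s hsfree _ (Or.inr ⟨_, rfl⟩)]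
      have hwc : ¬ ((PySem.Chars.lower (',' :: PySem.Chars.join [','] (s₂ :: ss'))).take 8 = pvExp) := by
        have h2 : PySem.Chars.lowerChar ',' = ',' := by decide
        simp only [PySem.Chars.lower, List.map_cons, h2]
        rw [show List.take 8 (',' :: List.map PySem.Chars.lowerChar (PySem.Chars.join [','] (s₂ :: ss')))
              = ',' :: List.take 7 (List.map PySem.Chars.lowerChar (PySem.Chars.join [','] (s₂ :: ss'))) from rfl]
        simp [pvExp]
      cases hb : pvSegStep (PySem.Chars.lower s) b with
      | false =>
        simp only [pvGoA, if_neg hwc, hb]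
        rw [if_pos (by simp)]
        rw [ih hss]
        simp [pvGoM, hb]
      | true =>
        simp only [pvGoA, if_neg hwc, hb]
        rw [if_neg (by simp)]
        rw [if_neg (by decide)]
        rw [ih hss]
        simp [pvGoM, hb]

theorem pv_PQ (segs : List (List Char)) :
    (∀ parts cur,
        pvGoB segs parts cur false
          = pvGoM segs (if cur = [] then parts else pvCloseB parts cur) [] false) ∧
    (∀ parts cur, cur ≠ [] → segs ≠ [] →
        pvGoB segs parts cur true
          = pvGoM segs parts (PySem.Chars.join [','] cur ++ [',']) true) := by
  induction segs with
  | nil =>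
    refine ⟨fun parts cur => ?_, fun parts cur hcur hne => absurd rfl hne⟩
    simp only [pvGoB, pvGoM, pvClose]
    simp [PySem.Chars.strip, pv_strip_nil]
  | cons s ss ih =>
    obtain ⟨ihP, ihQ⟩ := ih
    have hccs : ∀ (X : List (List Char)) (z : List Char),
        (if ([z] : List (List Char)) = [] then X else pvCloseB X [z]) = pvClose X z := by
      intro X z
      simp [pvCloseB, pvClose, pv_join_singleton']
    have hccapp : ∀ (X : List (List Char)) (cur : List (List Char)) (z : List Char), cur ≠ [] →
        (if cur ++ [z] = ([] : List (List Char)) then X else pvCloseB X (cur ++ [z]))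
          = pvClose X (PySem.Chars.join [','] cur ++ ',' :: z) := by
      intro X cur z hcur
      simp [pvCloseB, pvClose, pv_join_append _ _ hcur]
    constructor
    · intro parts cur
      simp only [pvGoB, if_neg Bool.false_ne_true]
      cases hb : pvSegStep (PySem.Chars.lower s) false with
      | false =>
        rw [ihP]
        rw [hccs]
        cases ss with
        | nil => simp [pvGoM, pvClose, PySem.Chars.strip, pv_strip_nil]
        | cons s₂ ss' => simp [pvGoM, hb]
      | true =>
        cases ss with
        | nil =>
          simp only [pvGoB, pvGoM]
          rw [hccs]
          simp
        | cons s₂ ss' =>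
          rw [ihQ _ _ (by simp) (by simp)]
          simp [pvGoM, hb, pv_join_singleton']
    · intro parts cur hcur hne
      simp only [pvGoB, if_pos rfl]
      cases hb : pvSegStep (PySem.Chars.lower s) true with
      | false =>
        cases ss with
        | nil =>
          simp only [pvGoB, pvGoM]
          rw [hccapp _ _ _ hcur]
          simp
        | cons s₂ ss' =>
          rw [ihP]
          rw [hccapp _ _ _ hcur]
          simp [pvGoM, hb]
      | true =>
        cases ss with
        | nil =>
          simp only [pvGoB, pvGoM]
          rw [hccapp _ _ _ hcur]
          simp
        | cons s₂ ss' =>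
          rw [ihQ _ _ (by simp) (by simp)]
          rw [pv_join_append _ _ hcur]
          simp [pvGoM, hb]

theorem pv_splitC_ne_nil (raw : List Char) : pvSplitC raw ≠ [] := by
  cases raw with
  | nil => simp [pvSplitC]
  | cons c r =>
    cases hx : pvSplitC r with
    | nil => simp [pvSplitC, hx]
    | cons h t =>
      simp only [pvSplitC, hx]
      split <;> simp

theorem pv_go_spec : ∀ (fuel : ℕ) (l : List Char), l.length < fuel →
    ∀ (cur : List Char) (acc : List (List Char)) (h' : List Char) (t' : List (List Char)),
      pvSplitC l = h' :: t' →
      PySem.Chars.splitOn.go [','] fuel l cur acc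
        = acc.reverse ++ (cur.reverse ++ h') :: t' := by
  intro fuel
  induction fuel with
  | zero => intro l hl; omega
  | succ f ihf =>
    intro l hl cur acc h' t' hsp
    cases l with
    | nil =>
      simp only [pvSplitC, List.cons.injEq] at hsp
      obtain ⟨rfl, rfl⟩ := hsp
      simp [PySem.Chars.splitOn.go]
    | cons c rest =>
      obtain ⟨h₂, t₂, hx⟩ : ∃ h₂ t₂, pvSplitC rest = h₂ :: t₂ := by
        cases hx : pvSplitC rest with
        | nil => exact absurd hx (pv_splitC_ne_nil rest)
        | cons a b => exact ⟨a, b, rfl⟩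
      by_cases hcc : c = ','
      · subst hcc
        have hpre : List.isPrefixOf [','] (',' :: rest) = true := by
          simp [List.isPrefixOf]
        simp only [PySem.Chars.splitOn.go, hpre, if_true]
        simp only [pvSplitC, hx, if_pos rfl, List.cons.injEq] at hsp
        obtain ⟨rfl, rfl⟩ := hsp
        rw [show List.drop (List.length [',']) (',' :: rest) = rest from rfl]
        rw [ihf rest (by simp at hl; omega) [] (cur.reverse :: acc) h₂ t₂ hx]
        simp
      · have hpre : List.isPrefixOf [','] (c :: rest) = false := by
          simp [List.isPrefixOf]
          exact fun h => absurd h.symm hcc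
        simp only [PySem.Chars.splitOn.go, hpre]
        simp only [Bool.false_eq_true, if_false]
        simp only [pvSplitC, hx, if_neg hcc, List.cons.injEq] at hsp
        obtain ⟨rfl, rfl⟩ := hsp
        rw [ihf rest (by simp at hl; omega) (c :: cur) acc h₂ t₂ hx]
        simp

theorem pv_splitOn_eq (raw : List Char) :
    PySem.Chars.splitOn raw [','] = pvSplitC raw := by
  unfold PySem.Chars.splitOn
  obtain ⟨h', t', hsp⟩ : ∃ h' t', pvSplitC raw = h' :: t' := by
    cases hx : pvSplitC raw with
    | nil => exact absurd hx (pv_splitC_ne_nil raw)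
    | cons a b => exact ⟨a, b, rfl⟩
  rw [pv_go_spec (raw.length + 1) raw (by omega) [] [] h' t' hsp, hsp]
  simp

theorem pv_join_splitC (raw : List Char) :
    PySem.Chars.join [','] (pvSplitC raw) = raw := by
  induction raw with
  | nil => simp [pvSplitC, pv_join_singleton']
  | cons c r ih =>
    obtain ⟨h', t', hx⟩ : ∃ h' t', pvSplitC r = h' :: t' := by
      cases hx : pvSplitC r with
      | nil => exact absurd hx (pv_splitC_ne_nil r)
      | cons a b => exact ⟨a, b, rfl⟩
    rw [hx] at ih
    simp only [pvSplitC, hx]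
    by_cases hc : c = ','
    · subst hc
      rw [if_pos rfl, PySem.Chars.join_cons_cons]
      simp [ih]
    · rw [if_neg hc]
      cases t' with
      | nil =>
        rw [pv_join_singleton']
        rw [pv_join_singleton'] at ih
        rw [ih]
      | cons t₁ t'' =>
        rw [PySem.Chars.join_cons_cons]
        rw [PySem.Chars.join_cons_cons] at ih
        rw [show (c :: h') ++ [','] ++ PySem.Chars.join [','] (t₁ :: t'')
              = c :: (h' ++ [','] ++ PySem.Chars.join [','] (t₁ :: t'')) by simp]
        rw [ih]

theorem pv_splitC_comma_free (raw : List Char) : ∀ s ∈ pvSplitC raw, ',' ∉ s := by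
  induction raw with
  | nil => simp [pvSplitC]
  | cons c r ih =>
    obtain ⟨h', t', hx⟩ : ∃ h' t', pvSplitC r = h' :: t' := by
      cases hx : pvSplitC r with
      | nil => exact absurd hx (pv_splitC_ne_nil r)
      | cons a b => exact ⟨a, b, rfl⟩
    rw [hx] at ih
    intro s hsmem
    simp only [pvSplitC, hx] at hsmem
    by_cases hc : c = ','
    · subst hc
      rw [if_pos rfl] at hsmem
      rcases List.mem_cons.mp hsmem with rfl | hsm
      · simp
      · exact ih s hsm
    · rw [if_neg hc] at hsmem
      rcases List.mem_cons.mp hsmem with rfl | hsm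
      · intro hmem
        rcases List.mem_cons.mp hmem with he | hmem'
        · exact hc he.symm
        · exact ih h' List.mem_cons_self hmem'
      · exact ih s (List.mem_cons_of_mem _ hsm)

theorem pv_splits_eq (raw : List Char) : pvSplitA raw = pvSplitB raw := by
  by_cases h : raw = []
  · subst h; rfl
  · unfold pvSplitA pvSplitB
    rw [if_neg h, pv_splitOn_eq]
    conv_lhs => rw [← pv_join_splitC raw]
    rw [pv_AM _ (pv_splitC_comma_free raw)]
    rw [(pv_PQ _).1]
    simp

theorem pv_loopA_any (l : List (List Char)) : pvLoopA l = l.any pvWeakB := by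
  induction l with
  | nil => rfl
  | cons c rest ih =>
    simp only [pvLoopA, pvWeakB, List.any_cons]
    cases h1 : PySem.Chars.isIn "samesite".toList (PySem.Chars.lower c) <;>
      cases h2 : PySem.Chars.isIn "samesite=none".toList (PySem.Chars.lower c) <;>
        cases h3 : PySem.Chars.isIn "secure".toList (PySem.Chars.lower c) <;>
          simp [h1, h2, h3, ih]

-- ===== VERDICT (by name: the statement is the Claim_ definition above) =====
theorem detect_samesite_issue_spec : Claim_equal_detect_samesite_issue := by
  intro headers _
  unfold Spec_detect_samesite_issue detect_samesite_issue detect_samesite_issue_alt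
  set raw := (PySem.Dict.getD (PySem.Dict.mk headers) "Set-Cookie" "").toList with hraw
  by_cases h : raw = []
  · rw [h]; rfl
  · simp only [if_neg h, pv_loopA_any, pv_splits_eq]
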